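-- pv_equiv track=rewrite | github.com/brandonywl/MDP_Algo | collision_detection.py | check_projection
-- ===== SOURCE A (Python) =====
-- def check_projection(normal, points):
--     min_val, max_val = None, None
--     for point in points:
--         projected = normal[0] * point[0] + normal[1] * point[1]
--         if min_val is None or projected < min_val:
--             min_val = projected
--         if max_val is None or projected > max_val:
--             max_val = projected
--
--     return min_val, max_val
-- ===== SOURCE B (Python) =====
-- def check_projection(normal, points):
--     proj = sorted(normal[0] * x + normal[1] * y for x, y in points)
--     if not proj:
--         return None, None
--     return proj[0], proj[-1]
-- ===== Notes on version B (the rewrite author's own statement) =====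
-- stated objective: alternative
-- what changed: Replaces A's single interleaved running-min/max loop with None-guards by sorting the projection list once and reading the extremes off its endpoints (first = min, last = max).
import Mathlib
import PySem

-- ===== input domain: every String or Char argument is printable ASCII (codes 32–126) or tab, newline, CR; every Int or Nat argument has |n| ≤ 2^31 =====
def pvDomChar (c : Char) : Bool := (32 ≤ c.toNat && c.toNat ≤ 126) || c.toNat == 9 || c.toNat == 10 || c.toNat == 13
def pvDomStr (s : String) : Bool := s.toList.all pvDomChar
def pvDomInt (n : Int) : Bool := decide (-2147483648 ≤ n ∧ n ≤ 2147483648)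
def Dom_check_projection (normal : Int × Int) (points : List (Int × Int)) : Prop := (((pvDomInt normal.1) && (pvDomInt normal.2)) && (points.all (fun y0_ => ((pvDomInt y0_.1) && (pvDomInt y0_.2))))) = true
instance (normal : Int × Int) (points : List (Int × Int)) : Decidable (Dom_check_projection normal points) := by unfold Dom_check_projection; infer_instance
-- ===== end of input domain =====

-- B sorts the projection list once and reads the extremes off its endpoints (alternative
-- algorithm); A keeps running min_val/max_val with None-guards in one interleaved loop.

-- ===== PORT A =====
def check_projection (normal : Int × Int) (points : List (Int × Int)) : Option Int × Option Int :=
  points.foldl (fun (st : Option Int × Option Int) point =>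
    let projected := normal.1 * point.1 + normal.2 * point.2
    let min_val := match st.1 with
      | none => some projected
      | some m => if projected < m then some projected else some m
    let max_val := match st.2 with
      | none => some projected
      | some m => if projected > m then some projected else some m
    (min_val, max_val)) (none, none)

-- ===== PORT B =====
def check_projection_alt (normal : Int × Int) (points : List (Int × Int)) : Option Int × Option Int :=
  let proj := PySem.List.sorted (points.map (fun p => normal.1 * p.1 + normal.2 * p.2)) (fun x => x) false
  if proj = [] then (none, none)
  else (PySem.List.pyGet? proj 0, PySem.List.pyGet? proj (-1))

-- ===== PRECONDITION & SPEC =====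
def Spec_check_projection (normal : Int × Int) (points : List (Int × Int)) (out : Option Int × Option Int) : Prop := out = check_projection_alt normal points
instance (normal : Int × Int) (points : List (Int × Int)) (out : Option Int × Option Int) : Decidable (Spec_check_projection normal points out) := by unfold Spec_check_projection; infer_instance

-- ===== CLAIM (what is proved, stated in full; the proofs are below) =====
def Claim_equal_check_projection : Prop := ∀ (normal : Int × Int) (points : List (Int × Int)), Dom_check_projection normal points → Spec_check_projection normal points (check_projection normal points)

-- ===== LEMMAS AND PROOFS =====

-- A's loop, once both slots are filled, computes the running min and max of the projections.
theorem pv_fold_some (normal : Int × Int) (points : List (Int × Int)) (a b : Int) :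
    points.foldl (fun (st : Option Int × Option Int) point =>
      let projected := normal.1 * point.1 + normal.2 * point.2
      let min_val := match st.1 with
        | none => some projected
        | some m => if projected < m then some projected else some m
      let max_val := match st.2 with
        | none => some projected
        | some m => if projected > m then some projected else some m
      (min_val, max_val)) (some a, some b)
    = (some ((points.map (fun p => normal.1 * p.1 + normal.2 * p.2)).foldl min a),
       some ((points.map (fun p => normal.1 * p.1 + normal.2 * p.2)).foldl max b)) := by
  induction points generalizing a b with
  | nil => simp
  | cons p t ih =>
    simp only [List.foldl_cons, List.map_cons]
    have h1 : (if normal.1 * p.1 + normal.2 * p.2 < a then some (normal.1 * p.1 + normal.2 * p.2) else some a)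
        = some (min a (normal.1 * p.1 + normal.2 * p.2)) := by
      rcases le_or_gt a (normal.1 * p.1 + normal.2 * p.2) with h | h
      · simp [h, not_lt.mpr h]
      · simp [min_def, h, not_le.mpr h]
    have h2 : (if normal.1 * p.1 + normal.2 * p.2 > b then some (normal.1 * p.1 + normal.2 * p.2) else some b)
        = some (max b (normal.1 * p.1 + normal.2 * p.2)) := by
      rcases le_or_gt (normal.1 * p.1 + normal.2 * p.2) b with h | h
      · simp [h, not_lt.mpr h]
      · simp [h, le_of_lt h]
    simp only [h1, h2]
    exact ih _ _

theorem pv_foldl_min_mem (a : Int) (l : List Int) : l.foldl min a ∈ a :: l := by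
  induction l generalizing a with
  | nil => simp
  | cons x t ih =>
    simp only [List.foldl_cons]
    rcases List.mem_cons.mp (ih (min a x)) with h | h
    · rw [h]
      rcases min_choice a x with he | he <;> rw [he] <;> simp
    · exact List.mem_cons_of_mem _ (List.mem_cons_of_mem _ h)

theorem pv_foldl_min_le : ∀ (l : List Int) (a : Int), ∀ x ∈ a :: l, l.foldl min a ≤ x := by
  intro l
  induction l with
  | nil => simp
  | cons y t ih =>
    intro a x hx
    simp only [List.foldl_cons]
    rcases List.mem_cons.mp hx with h | h
    · subst h
      exact le_trans (ih _ _ List.mem_cons_self) (min_le_left x y)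
    · rcases List.mem_cons.mp h with h | h
      · subst h
        exact le_trans (ih _ _ List.mem_cons_self) (min_le_right a x)
      · exact ih _ _ (List.mem_cons_of_mem _ h)

theorem pv_foldl_max_mem (a : Int) (l : List Int) : l.foldl max a ∈ a :: l := by
  induction l generalizing a with
  | nil => simp
  | cons x t ih =>
    simp only [List.foldl_cons]
    rcases List.mem_cons.mp (ih (max a x)) with h | h
    · rw [h]
      rcases max_choice a x with he | he <;> rw [he] <;> simp
    · exact List.mem_cons_of_mem _ (List.mem_cons_of_mem _ h)

theorem pv_foldl_max_ge : ∀ (l : List Int) (a : Int), ∀ x ∈ a :: l, x ≤ l.foldl max a := by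
  intro l
  induction l with
  | nil => simp
  | cons y t ih =>
    intro a x hx
    simp only [List.foldl_cons]
    rcases List.mem_cons.mp hx with h | h
    · subst h
      exact le_trans (le_max_left x y) (ih _ _ List.mem_cons_self)
    · rcases List.mem_cons.mp h with h | h
      · subst h
        exact le_trans (le_max_right a x) (ih _ _ List.mem_cons_self)
      · exact ih _ _ (List.mem_cons_of_mem _ h)

-- In a ≤-pairwise list, the last element dominates every member.
theorem pv_getLast_ge (l : List Int) (hp : l.Pairwise (· ≤ ·)) (hne : l ≠ []) :
    ∀ x ∈ l, x ≤ l.getLast hne := by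
  induction l with
  | nil => simp at hne
  | cons y t ih =>
    intro x hx
    cases t with
    | nil => simp_all
    | cons z u =>
      rcases List.mem_cons.mp hx with h | h
      · subst h
        have hy : x ≤ z := (List.pairwise_cons.mp hp).1 z List.mem_cons_self
        have := ih (List.pairwise_cons.mp hp).2 (by simp) z List.mem_cons_self
        calc x ≤ z := hy
          _ ≤ _ := this
      · have := ih (List.pairwise_cons.mp hp).2 (by simp) x h
        simpa [List.getLast] using this

-- ===== VERDICT (by name: the statement is the Claim_ definition above) =====
theorem check_projection_spec : Claim_equal_check_projection := by
  intro normal points _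
  unfold Spec_check_projection check_projection check_projection_alt
  cases points with
  | nil => simp [PySem.List.sorted]
  | cons p t =>
    simp only [List.foldl_cons, List.map_cons]
    rw [pv_fold_some]
    set f : Int × Int → Int := fun q => normal.1 * q.1 + normal.2 * q.2 with hf
    generalize hs : PySem.List.sorted (f p :: List.map f t) (fun x => x) false = s
    have hsne : s ≠ [] := by
      intro h
      subst h
      have := (PySem.List.sorted_eq_nil_iff (xs := f p :: List.map f t)
        (key := fun x => x) (rev := false)).mp hs
      simp at this
    obtain ⟨h0, s', hcons⟩ := List.exists_cons_of_ne_nil hsne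
    have hmem : ∀ x : Int, x ∈ s ↔ x ∈ f p :: List.map f t := by
      intro x
      rw [← hs]
      exact PySem.List.mem_sorted _ _ _ _
    have hpair : s.Pairwise (· ≤ ·) := by
      rw [← hs]
      simpa using PySem.List.sorted_pairwise (xs := f p :: List.map f t) (key := fun x => x)
    -- min side: the fold's minimum is the sorted head
    have hhead : (t.map f).foldl min (f p) = h0 := by
      apply le_antisymm
      · exact pv_foldl_min_le _ _ h0 ((hmem h0).mp (hcons ▸ List.mem_cons_self))
      · exact PySem.List.key_head_sorted_le _ _ (hs.trans hcons) _ (pv_foldl_min_mem _ _)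
    -- max side: the fold's maximum is the sorted last element
    have hlast : (t.map f).foldl max (f p) = s.getLast hsne := by
      apply le_antisymm
      · exact pv_getLast_ge s hpair hsne _ ((hmem _).mpr (pv_foldl_max_mem _ _))
      · exact pv_foldl_max_ge _ _ _ ((hmem _).mp (List.getLast_mem hsne))
    rw [if_neg hsne, hcons, PySem.List.pyGet?_zero_cons, ← hcons,
        PySem.List.pyGet?_neg_one, List.getLast?_eq_getLast_of_ne_nil hsne,
        hhead, hlast]
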